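-- pv_equiv track=rewrite | github.com/ussesaleem/python | kmom10/try1/exam.py | count_animals
-- ===== SOURCE A (Python) =====
-- def count_animals(animals):
--     """
--     Assignment 2
--     """
--     for animal in animals:
--         if type(animals[animal]) is not list:
--             animals = list(animals[animal])
--
--     for name in animals:
--         animals[name] = sorted(animals[name])
--
--     numbers_list = []
--     sort_by_number = {}
--     for animal in animals:
--         quant = len(animals[animal])
--         if quant not in sort_by_number:
--             sort_by_number[quant] = []
--             numbers_list.append(quant)
--         names = str(animals[animal]).replace("[", "").replace("]", "").replace("\'", "")
--         result = animal + ": " + names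
--         sort_by_number[quant].append(result)
--     numbers_list = sorted(numbers_list)
--
--     for number in sort_by_number:
--         sort_by_number[number] = sorted(sort_by_number[number])
--
--     end_result = ""
--     for numbers in numbers_list:
--         for animal in sort_by_number[numbers]:
--             end_result += str(numbers) + " " + str(animal) + "\n"
--
--     return end_result.strip("\n")
-- ===== SOURCE B (Python) =====
-- def count_animals(animals):
--     """
--     Assignment 2 - single-pass flat list of (count, line) tuples, one sort, one join.
--     (Equivalent on return value; unlike A it does not mutate the input dict.)
--     """
--     pairs = []
--     for name in animals:
--         values = sorted(animals[name])
--         names = str(values).replace("[", "").replace("]", "").replace("'", "")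
--         pairs.append((len(values), name + ": " + names))
--     pairs.sort()
--     return "\n".join(str(quantity) + " " + text for quantity, text in pairs)
-- ===== Notes on version B (the rewrite author's own statement) =====
-- stated objective: simpler
-- what changed: Replaces the count-keyed dict of buckets plus three separate sort passes (the numbers list and each bucket) and string accumulation with strip by one flat list of (count, line) tuples built in a single pass, sorted once, and joined with a single '\n'.join.
import Mathlib
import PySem

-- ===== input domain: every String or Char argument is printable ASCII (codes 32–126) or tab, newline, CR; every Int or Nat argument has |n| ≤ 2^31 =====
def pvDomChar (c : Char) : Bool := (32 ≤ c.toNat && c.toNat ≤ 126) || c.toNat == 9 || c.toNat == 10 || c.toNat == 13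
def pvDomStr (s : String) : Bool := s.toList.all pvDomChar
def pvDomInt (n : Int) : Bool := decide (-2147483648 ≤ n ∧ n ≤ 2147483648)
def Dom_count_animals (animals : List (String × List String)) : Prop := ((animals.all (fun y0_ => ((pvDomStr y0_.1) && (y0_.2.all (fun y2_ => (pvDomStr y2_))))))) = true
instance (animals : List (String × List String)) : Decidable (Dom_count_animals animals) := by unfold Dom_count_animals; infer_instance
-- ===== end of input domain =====

-- B replaces A's count-keyed dict of buckets and its separate sort passes by one flat (count, line)
-- list built in a single pass, sorted once and joined once (same return value; note that A mutates
-- the caller's dict in place while B does not).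

-- ===== PORT A =====
-- Helper shared by BOTH ports: the Python expression  str(sorted_list).replace("[","").replace("]","").replace("'","")
-- appears verbatim in A and in B.  pvEsc/pvRepr hand-port CPython's repr of a str (quote choice and
-- escaping), exact for strings over printable ASCII plus tab/newline/CR (the task's input domain).
def pvEsc (q c : Char) : List Char :=
  if c = '\\' then ['\\', '\\']
  else if c = q then ['\\', q]
  else if c = '\t' then ['\\', 't']
  else if c = '\n' then ['\\', 'n']
  else if c = '\r' then ['\\', 'r']
  else [c]

def pvRepr (cs : List Char) : List Char :=
  let q : Char := if '\'' ∈ cs ∧ '"' ∉ cs then '"' else '\''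
  q :: (cs.flatMap (pvEsc q) ++ [q])

-- str(v) for a list of strings: '[' + ", ".join(repr(e) for e in v) + ']'
def pvStrOfList (v : List (List Char)) : List Char :=
  '[' :: (PySem.Chars.join [',', ' '] (v.map pvRepr) ++ [']'])

-- str(v).replace("[", "").replace("]", "").replace("'", "")
def pvFmt (v : List (List Char)) : List Char :=
  PySem.Chars.replace (PySem.Chars.replace (PySem.Chars.replace (pvStrOfList v) ['['] []) [']'] []) ['\''] []

-- A's third loop: build numbers_list and the dict sort_by_number keyed by count
def pvLoop3 (l2 : List (List Char × List (List Char))) :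
    List Int × PySem.Dict Int (List (List Char)) :=
  l2.foldl (fun st kv =>
      let quant : Int := PySem.List.len kv.2
      let st1 := if st.2.contains quant then st else (st.1 ++ [quant], st.2.insert quant [])
      let names := pvFmt kv.2
      let result := kv.1 ++ [':', ' '] ++ names
      (st1.1, st1.2.modify quant [] (fun x => x ++ [result])))
    ([], PySem.Dict.empty)

-- A's fourth loop: for number in sort_by_number: sort_by_number[number] = sorted(...)
def pvLoop4 (d : PySem.Dict Int (List (List Char))) : PySem.Dict Int (List (List Char)) :=
  d.keys.foldl (fun s n => s.insert n (PySem.List.sorted (s.getD n []) (fun x => x) false)) d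

-- A's final loop: end_result accumulation
def pvEndr (numbers_list : List Int) (sbn : PySem.Dict Int (List (List Char))) : List Char :=
  numbers_list.foldl (fun acc q =>
    (sbn.getD q []).foldl (fun acc s => acc ++ (PySem.Int.toChars q ++ [' '] ++ s ++ ['\n'])) acc) []

-- A, on char lists (dict ported as association list in insertion order; a Python dict has no duplicate
-- keys).  A's first loop is a no-op here: `type(animals[animal]) is not list` is false for every value
-- of a dict[str, list[str]].
def pvCountA (l : List (List Char × List (List Char))) : List Char :=
  -- for name in animals: animals[name] = sorted(animals[name])
  let l2 := l.map (fun kv => (kv.1, PySem.List.sorted kv.2 (fun x => x) false))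
  let st := pvLoop3 l2
  let numbers_list := PySem.List.sorted st.1 (fun x => x) false
  let sbn := pvLoop4 st.2
  -- end_result, then .strip("\n")
  PySem.Chars.stripChars (pvEndr numbers_list sbn) ['\n']

def count_animals (animals : List (String × List String)) : String :=
  String.ofList (pvCountA (animals.map (fun kv => (kv.1.toList, kv.2.map String.toList))))

-- ===== PORT B =====
def pvCountB (l : List (List Char × List (List Char))) : List Char :=
  let pairs := l.foldl (fun (acc : List (Int × List Char)) kv =>
      let v := PySem.List.sorted kv.2 (fun x => x) false
      acc ++ [(PySem.List.len v, kv.1 ++ [':', ' '] ++ pvFmt v)]) []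
  let pairs := PySem.List.sorted2 pairs (fun p => p.1) (fun p => p.2) false
  PySem.Chars.join ['\n'] (pairs.map (fun p => PySem.Int.toChars p.1 ++ [' '] ++ p.2))

def count_animals_alt (animals : List (String × List String)) : String :=
  String.ofList (pvCountB (animals.map (fun kv => (kv.1.toList, kv.2.map String.toList))))

-- ===== PRECONDITION & SPEC =====
def Spec_count_animals (animals : List (String × List String)) (out : String) : Prop := out = count_animals_alt animals
instance (animals : List (String × List String)) (out : String) : Decidable (Spec_count_animals animals out) := by unfold Spec_count_animals; infer_instance

-- ===== CLAIM (what is proved, stated in full; the proofs are below) =====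
def Claim_equal_count_animals : Prop := ∀ (animals : List (String × List String)), Dom_count_animals animals → Spec_count_animals animals (count_animals animals)

-- ===== LEMMAS AND PROOFS =====

-- one (count, "name: a, b, c") pair per animal, in insertion order
def pvEntries (l : List (List Char × List (List Char))) : List (Int × List Char) :=
  l.map (fun kv => (PySem.List.len (PySem.List.sorted kv.2 (fun x => x) false),
                    kv.1 ++ [':', ' '] ++ pvFmt (PySem.List.sorted kv.2 (fun x => x) false)))

def pvLine (p : Int × List Char) : List Char := PySem.Int.toChars p.1 ++ [' '] ++ p.2

-- A's grouped traversal order, as a flat list of (count, line-body) pairs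
def pvGroups (es : List (Int × List Char)) : List (Int × List Char) :=
  (PySem.List.sorted (PySem.List.dedup (es.map (fun p => p.1))) (fun x => x) false).flatMap
    (fun q => (PySem.List.sorted ((es.filter (fun p => p.1 == q)).map (fun p => p.2)) (fun x => x) false).map
      (fun s => (q, s)))

-- the body of A's third loop, as a function of the (count, line-body) pair
def pvStepA (st : List Int × PySem.Dict Int (List (List Char))) (p : Int × List Char) :
    List Int × PySem.Dict Int (List (List Char)) :=
  let st1 := if st.2.contains p.1 then st else (st.1 ++ [p.1], st.2.insert p.1 [])
  (st1.1, st1.2.modify p.1 [] (fun x => x ++ [p.2]))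

theorem pvSortedIrrel {α κ : Type} [LT κ] (d1 d2 : DecidableLT κ) (xs : List α) (key : α → κ) (rev : Bool) :
    @PySem.List.sorted α κ _ d1 xs key rev = @PySem.List.sorted α κ _ d2 xs key rev := by
  rw [Subsingleton.elim d1 d2]

-- ---------- B's shape ----------
theorem pvCountB_eq (l : List (List Char × List (List Char))) :
    pvCountB l = PySem.Chars.join ['\n']
      ((PySem.List.sorted2 (pvEntries l) (fun p => p.1) (fun p => p.2) false).map pvLine) := by
  unfold pvCountB pvEntries pvLine
  rw [PySem.List.foldl_append_singleton_eq_map]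
  rfl

-- ---------- the tuple sort is A's grouped traversal ----------
theorem pairwise_insertBy {α : Type} {r : α → α → Prop} (ht : ∀ a b c, r a b → r b c → r a c)
    {before : α → α → Bool}
    (hT : ∀ a b, before a b = true → r a b) (hF : ∀ a b, before a b = false → r b a)
    (x : α) : ∀ (acc : List α), acc.Pairwise r → (PySem.List.insertBy before x acc).Pairwise r := by
  intro acc
  induction acc with
  | nil => intro _; simp [PySem.List.insertBy]
  | cons y ys ih =>
    intro hp
    rw [List.pairwise_cons] at hp
    by_cases hb : before x y = true
    · simp only [PySem.List.insertBy, hb, if_pos]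
      refine List.Pairwise.cons ?_ (List.Pairwise.cons hp.1 hp.2)
      intro z hz
      rcases List.mem_cons.mp hz with h | h
      · exact h ▸ hT _ _ hb
      · exact ht _ _ _ (hT _ _ hb) (hp.1 z h)
    · simp only [PySem.List.insertBy, hb, if_neg, Bool.false_eq_true, not_false_iff]
      refine List.Pairwise.cons ?_ (ih hp.2)
      intro z hz
      rcases (PySem.List.mem_insertBy before x z ys).mp hz with h | h
      · exact h ▸ hF _ _ (Bool.not_eq_true _ ▸ (by simpa using hb))
      · exact hp.1 z h

theorem pairwise_foldl_insertBy {α : Type} {r : α → α → Prop} (ht : ∀ a b c, r a b → r b c → r a c)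
    {before : α → α → Bool}
    (hT : ∀ a b, before a b = true → r a b) (hF : ∀ a b, before a b = false → r b a) :
    ∀ (xs acc : List α), acc.Pairwise r → (xs.foldl (fun acc x => PySem.List.insertBy before x acc) acc).Pairwise r := by
  intro xs
  induction xs with
  | nil => intro acc h; exact h
  | cons x xs ih => intro acc h; exact ih _ (pairwise_insertBy ht hT hF x acc h)

-- the order in which Python compares (count, line) tuples
def le2 (a b : Int × List Char) : Prop := a.1 < b.1 ∨ (a.1 = b.1 ∧ a.2 ≤ b.2)

theorem le2_trans : ∀ a b c, le2 a b → le2 b c → le2 a c := by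
  intro a b c h1 h2
  rcases h1 with h1 | ⟨e1, h1⟩ <;> rcases h2 with h2 | ⟨e2, h2⟩
  · exact Or.inl (lt_trans h1 h2)
  · exact Or.inl (e2 ▸ h1)
  · exact Or.inl (e1 ▸ h2)
  · exact Or.inr ⟨e1.trans e2, le_trans h1 h2⟩

theorem le2_antisymm : ∀ (a b : Int × List Char), le2 a b → le2 b a → a = b := by
  intro a b h1 h2
  rcases h1 with h1 | ⟨e1, h1⟩ <;> rcases h2 with h2 | ⟨e2, h2⟩
  · exact absurd h2 (lt_asymm h1)
  · exact absurd h1 (e2 ▸ lt_irrefl _)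
  · exact absurd h2 (e1 ▸ lt_irrefl _)
  · exact Prod.ext e1 (le_antisymm h1 h2)

theorem sorted2_pairwise_le2 (es : List (Int × List Char)) :
    (PySem.List.sorted2 es (fun p => p.1) (fun p => p.2) false).Pairwise le2 := by
  show (es.foldl (fun acc x => PySem.List.insertBy
        (fun a b => decide (a.1 < b.1) || (!decide (b.1 < a.1) && decide (a.2 < b.2))) x acc) []).Pairwise le2
  refine pairwise_foldl_insertBy le2_trans ?_ ?_ es [] (List.Pairwise.nil)
  · intro a b h
    simp only [Bool.or_eq_true, Bool.and_eq_true, Bool.not_eq_true', decide_eq_true_eq,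
      decide_eq_false_iff_not] at h
    rcases h with h | ⟨h1, h2⟩
    · exact Or.inl h
    · rcases lt_trichotomy a.1 b.1 with h3 | h3 | h3
      · exact Or.inl h3
      · exact Or.inr ⟨h3, le_of_lt h2⟩
      · exact absurd h3 h1
  · intro a b h
    have h' : ¬ (a.1 < b.1) ∧ (b.1 < a.1 ∨ ¬ (a.2 < b.2)) := by
      constructor
      · intro h1; simp [h1] at h
      · by_cases hb : b.1 < a.1
        · exact Or.inl hb
        · refine Or.inr (fun h2 => ?_)
          simp [hb, h2] at h
    by_cases hb : b.1 < a.1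
    · exact Or.inl hb
    · have e : b.1 = a.1 := le_antisymm (le_of_not_gt h'.1) (le_of_not_gt hb)
      have h2 : ¬ (a.2 < b.2) := (h'.2).resolve_left hb
      exact Or.inr ⟨e, le_of_not_gt h2⟩

theorem pvGroups_pairwise (es : List (Int × List Char)) : (pvGroups es).Pairwise le2 := by
  unfold pvGroups
  rw [List.flatMap_def]
  rw [List.pairwise_flatten]
  constructor
  · intro l' hl'
    rcases List.mem_map.mp hl' with ⟨q, _, rfl⟩
    rw [List.pairwise_map]
    have h := PySem.List.sorted_pairwise (κ := List Char)
      ((es.filter (fun p => p.1 == q)).map (fun p => p.2)) (fun x => x)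
    rw [pvSortedIrrel _ LinearOrder.toDecidableLT]
    exact h.imp (fun hab => Or.inr ⟨rfl, hab⟩)
  · have houter : (PySem.List.sorted (PySem.List.dedup (es.map (fun p => p.1))) (fun x => x) false).Pairwise (· < ·) := by
      rw [PySem.List.dedup_eq_ofList, pvSortedIrrel _ LinearOrder.toDecidableLT]
      exact PySem.List.sorted_ofList_pairwise_lt _
    rw [List.pairwise_map]
    refine houter.imp ?_
    intro q q' hqq x hx y hy
    rcases List.mem_map.mp hx with ⟨s, _, rfl⟩
    rcases List.mem_map.mp hy with ⟨t, _, rfl⟩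
    exact Or.inl hqq

theorem flatten_perm_congr {α β : Type} (ks : List β) (f g : β → List α)
    (h : ∀ q ∈ ks, (f q).Perm (g q)) : ((ks.map f).flatten).Perm ((ks.map g).flatten) := by
  induction ks with
  | nil => rfl
  | cons k ks ih =>
    simp only [List.map_cons, List.flatten_cons]
    exact (h k (List.mem_cons_self)).append (ih (fun q hq => h q (List.mem_cons_of_mem _ hq)))

theorem flatten_filter_perm {α : Type} (ks : List Int) :
    ∀ (es : List (Int × α)), ks.Nodup → (∀ p ∈ es, p.1 ∈ ks) →
    ((ks.map (fun q => es.filter (fun p => p.1 == q))).flatten).Perm es := by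
  induction ks with
  | nil =>
    intro es _ hcov
    have : es = [] := List.eq_nil_iff_forall_not_mem.mpr (fun p hp => by simpa using hcov p hp)
    simp [this]
  | cons k ks ih =>
    intro es hnd hcov
    simp only [List.map_cons, List.flatten_cons]
    have hk : k ∉ ks := (List.nodup_cons.mp hnd).1
    have hstep : ∀ q ∈ ks, es.filter (fun p => p.1 == q)
        = (es.filter (fun p => !(p.1 == k))).filter (fun p => p.1 == q) := by
      intro q hq
      rw [List.filter_filter]
      refine List.filter_congr ?_
      intro p _
      by_cases hpq : p.1 = q
      · have hqk : ¬ (q = k) := fun hh => hk (hh ▸ hq)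
        simp [hpq, hqk]
      · simp [hpq]
    rw [List.map_congr_left hstep]
    have ihp := ih (es.filter (fun p => !(p.1 == k))) (List.nodup_cons.mp hnd).2 (by
      intro p hp
      have hmem := List.mem_of_mem_filter hp
      have hne : ¬ (p.1 == k) = true := by simpa using List.of_mem_filter hp
      rcases List.mem_cons.mp (hcov p hmem) with h | h
      · exact absurd (by simp [h]) hne
      · exact h)
    exact (List.Perm.append_left _ ihp).trans (List.filter_append_perm _ es)

theorem pvGroups_perm (es : List (Int × List Char)) : (pvGroups es).Perm es := by
  unfold pvGroups
  rw [List.flatMap_def]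
  have h1 : ∀ q ∈ PySem.List.sorted (PySem.List.dedup (es.map (fun p => p.1))) (fun x => x) false,
      ((PySem.List.sorted ((es.filter (fun p => p.1 == q)).map (fun p => p.2)) (fun x => x) false).map
        (fun s => (q, s))).Perm (es.filter (fun p => p.1 == q)) := by
    intro q _
    have hp : ((PySem.List.sorted ((es.filter (fun p => p.1 == q)).map (fun p => p.2)) (fun x => x) false).map
        (fun s => (q, s))).Perm (((es.filter (fun p => p.1 == q)).map (fun p => p.2)).map (fun s => (q, s))) :=
      (PySem.List.sorted_perm _ _ _).map _
    refine hp.trans ?_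
    rw [List.map_map]
    have hid : ∀ p ∈ es.filter (fun p => p.1 == q), ((fun s => (q, s)) ∘ (fun p => p.2)) p = id p := by
      intro p hp'
      have : p.1 = q := by simpa using List.of_mem_filter hp'
      simp [← this]
    rw [List.map_congr_left hid, List.map_id]
  refine ((flatten_perm_congr _ _ _ h1).trans ?_)
  have h2 := (PySem.List.sorted_perm (PySem.List.dedup (es.map (fun p => p.1))) (fun x => x) false).map
      (fun q => es.filter (fun p => p.1 == q))
  refine (List.Perm.flatten h2).trans ?_
  refine flatten_filter_perm _ es ?_ ?_
  · rw [PySem.List.dedup_eq_ofList]; exact PySem.Set.nodup_ofList _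
  · intro p hp
    rw [PySem.List.mem_dedup]
    exact List.mem_map.mpr ⟨p, hp, rfl⟩

theorem pvKey (es : List (Int × List Char)) :
    PySem.List.sorted2 es (fun p => p.1) (fun p => p.2) false = pvGroups es := by
  refine List.Perm.eq_of_pairwise (le := le2) (fun a b _ _ => le2_antisymm a b)
    (sorted2_pairwise_le2 es) (pvGroups_pairwise es) ?_
  exact (PySem.List.sorted2_perm es _ _ false).trans (pvGroups_perm es).symm

-- ---------- characterising A's loops ----------
theorem pvStepA_snd (es : List (Int × List Char)) :
    ∀ (nl : List Int) (d : PySem.Dict Int (List (List Char))),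
    (es.foldl pvStepA (nl, d)).2 = es.foldl (fun d p => d.modify p.1 [] (fun x => x ++ [p.2])) d := by
  induction es with
  | nil => intro nl d; rfl
  | cons p es ih =>
    intro nl d
    simp only [List.foldl_cons]
    by_cases hc : d.contains p.1
    · have hstep : pvStepA (nl, d) p = (nl, d.modify p.1 [] (fun x => x ++ [p.2])) := by
        simp [pvStepA, hc]
      rw [hstep, ih]
    · have hstep : pvStepA (nl, d) p = (nl ++ [p.1], (d.insert p.1 []).modify p.1 [] (fun x => x ++ [p.2])) := by
        simp [pvStepA, hc]
      have hcol : (d.insert p.1 []).modify p.1 [] (fun x => x ++ [p.2])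
          = d.modify p.1 [] (fun x => x ++ [p.2]) := by
        unfold PySem.Dict.modify
        rw [PySem.Dict.getD_insert_self, PySem.Dict.insert_insert_self,
          PySem.Dict.getD_of_not_contains d [] (by simpa using hc)]
      rw [hstep, hcol, ih]

theorem pvStepA_fst (es : List (Int × List Char)) :
    ∀ (nl : List Int) (d : PySem.Dict Int (List (List Char))),
    (∀ q : Int, d.contains q = nl.contains q) →
    (es.foldl pvStepA (nl, d)).1 = es.foldl (fun s p => PySem.Set.add s p.1) nl := by
  induction es with
  | nil => intro nl d _; rfl
  | cons p es ih =>
    intro nl d hinv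
    simp only [List.foldl_cons]
    by_cases hc : d.contains p.1
    · have hmem : nl.contains p.1 = true := hinv p.1 ▸ hc
      have h1 : pvStepA (nl, d) p = (nl, d.modify p.1 [] (fun x => x ++ [p.2])) := by
        simp [pvStepA, hc]
      have hmem' : p.1 ∈ nl := by simpa using hmem
      have h2 : PySem.Set.add nl p.1 = nl := by simp [PySem.Set.add, hmem']
      rw [h1, h2, ih nl _ (fun q => by
        rw [PySem.Dict.contains_modify]
        by_cases hq : q = p.1
        · simp [hq, hmem']
        · simp [hq, hinv q]
      )]
    · have hmem : nl.contains p.1 = false := by rw [← hinv p.1]; simpa using hc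
      have h1 : pvStepA (nl, d) p = (nl ++ [p.1], (d.insert p.1 []).modify p.1 [] (fun x => x ++ [p.2])) := by
        simp [pvStepA, hc]
      have hmem' : p.1 ∉ nl := by simpa using hmem
      have h2 : PySem.Set.add nl p.1 = nl ++ [p.1] := by simp [PySem.Set.add, hmem']
      rw [h1, h2, ih _ _ (fun q => by
        rw [PySem.Dict.contains_modify, PySem.Dict.contains_insert]
        by_cases hq : q = p.1
        · simp [hq]
        · simp [hq, hinv q])]

theorem pvSortLoopGetD (f : List (List Char) → List (List Char)) :
    ∀ (ks : List Int) (d : PySem.Dict Int (List (List Char))) (q : Int), ks.Nodup →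
    (ks.foldl (fun s n => s.insert n (f (s.getD n []))) d).getD q []
      = if q ∈ ks then f (d.getD q []) else d.getD q [] := by
  intro ks
  induction ks with
  | nil => intro d q _; simp
  | cons k ks ih =>
    intro d q hnd
    simp only [List.foldl_cons]
    rw [ih _ _ (List.nodup_cons.mp hnd).2]
    by_cases hq : q = k
    · subst hq
      have : q ∉ ks := (List.nodup_cons.mp hnd).1
      simp [this, PySem.Dict.getD_insert_self]
    · by_cases hq2 : q ∈ ks
      · simp [hq2, PySem.Dict.getD_insert_of_ne d _ _ hq]
      · simp [hq2, hq, PySem.Dict.getD_insert_of_ne d _ _ hq]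

theorem pvLoop3_eq_foldl (l : List (List Char × List (List Char))) :
    pvLoop3 (l.map (fun kv => (kv.1, PySem.List.sorted kv.2 (fun x => x) false)))
      = (pvEntries l).foldl pvStepA ([], PySem.Dict.empty) := by
  unfold pvLoop3 pvEntries
  rw [List.foldl_map, List.foldl_map]
  rfl

theorem pvLoop3_fst (l : List (List Char × List (List Char))) :
    ((pvEntries l).foldl pvStepA ([], PySem.Dict.empty)).1
      = PySem.List.dedup ((pvEntries l).map (fun p => p.1)) := by
  rw [pvStepA_fst _ _ _ (fun q => by simp)]
  rw [← PySem.Set.update_map_eq_foldl_add, PySem.Set.update_nil_left, PySem.List.dedup_eq_ofList]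

theorem pvLoop3_snd_getD (l : List (List Char × List (List Char))) (q : Int) :
    ((pvEntries l).foldl pvStepA ([], PySem.Dict.empty)).2.getD q []
      = ((pvEntries l).filter (fun p => p.1 == q)).map (fun p => p.2) := by
  rw [pvStepA_snd, PySem.Dict.getD_foldl_modify_append]
  simp

theorem pvLoop3_snd_keys (l : List (List Char × List (List Char))) :
    ((pvEntries l).foldl pvStepA ([], PySem.Dict.empty)).2.keys
      = PySem.List.dedup ((pvEntries l).map (fun p => p.1)) := by
  rw [pvStepA_snd, PySem.Dict.keys_foldl_modify_key]
  rw [PySem.Dict.keys_empty, PySem.Set.update_nil_left, PySem.List.dedup_eq_ofList]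

-- ---------- A's shape ----------
theorem pvCountA_eq (l : List (List Char × List (List Char))) :
    pvCountA l = PySem.Chars.stripChars
      (((pvGroups (pvEntries l)).map pvLine).flatMap (fun s => s ++ ['\n'])) ['\n'] := by
  show PySem.Chars.stripChars
      (pvEndr (PySem.List.sorted (pvLoop3 (l.map (fun kv => (kv.1, PySem.List.sorted kv.2 (fun x => x) false)))).1 (fun x => x) false)
        (pvLoop4 (pvLoop3 (l.map (fun kv => (kv.1, PySem.List.sorted kv.2 (fun x => x) false)))).2)) ['\n'] = _
  rw [pvLoop3_eq_foldl]
  congr 1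
  have hnd : (PySem.List.dedup ((pvEntries l).map (fun p => p.1))).Nodup := by
    rw [PySem.List.dedup_eq_ofList]; exact PySem.Set.nodup_ofList _
  have hget : ∀ q ∈ PySem.List.sorted ((pvEntries l).foldl pvStepA ([], PySem.Dict.empty)).1 (fun x => x) false,
      (pvLoop4 ((pvEntries l).foldl pvStepA ([], PySem.Dict.empty)).2).getD q []
        = PySem.List.sorted (((pvEntries l).filter (fun p => p.1 == q)).map (fun p => p.2)) (fun x => x) false := by
    intro q hq
    rw [PySem.List.mem_sorted, pvLoop3_fst] at hq
    unfold pvLoop4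
    rw [pvSortLoopGetD (fun v => PySem.List.sorted v (fun x => x) false) _ _ _
      (pvLoop3_snd_keys l ▸ hnd)]
    rw [pvLoop3_snd_keys, if_pos hq, pvLoop3_snd_getD]
  unfold pvEndr
  simp only [PySem.List.foldl_append_eq_flatMap, List.nil_append]
  rw [List.flatMap_congr (fun q hq => by rw [hget q hq])]
  rw [pvLoop3_fst]
  unfold pvGroups pvLine
  rw [List.map_flatMap, List.flatMap_assoc]
  refine List.flatMap_congr (fun q _ => ?_)
  rw [List.map_map, List.flatMap_map]
  rfl

-- ---------- no '\n' inside the formatted pieces, and line shapes ----------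
theorem pvDigitCore_mem (b : Char) (hb : ∀ m < 10, Nat.digitChar m ≠ b) :
    ∀ (fuel n : Nat) (ds : List Char), (∀ c ∈ ds, c ≠ b) →
      ∀ c ∈ Nat.toDigitsCore 10 fuel n ds, c ≠ b := by
  intro fuel
  induction fuel with
  | zero => intro n ds hds c hc; exact hds c hc
  | succ fuel ih =>
    intro n ds hds c hc
    rw [Nat.toDigitsCore] at hc
    have hd : ∀ c' ∈ ((n % 10).digitChar :: ds), c' ≠ b := by
      intro c' hc'
      rcases List.mem_cons.mp hc' with h | h
      · exact h ▸ hb _ (Nat.mod_lt _ (by norm_num))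
      · exact hds c' h
    by_cases hz : n / 10 = 0
    · rw [if_pos hz] at hc; exact hd c hc
    · rw [if_neg hz] at hc; exact ih _ _ hd c hc

theorem pvToCharsNoNl (n : Int) : ∀ c ∈ PySem.Int.toChars n, c ≠ '\n' := by
  intro c hc
  have hb : ∀ m < 10, Nat.digitChar m ≠ '\n' := by decide
  unfold PySem.Int.toChars at hc
  split at hc
  · rcases List.mem_cons.mp hc with h | h
    · exact h ▸ (by decide)
    · exact pvDigitCore_mem _ hb _ _ [] (by simp) c h
  · exact pvDigitCore_mem _ hb _ _ [] (by simp) c hc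

-- replace(old, "") with a single-character old is a filter
theorem pvReplaceGo (b : Char) : ∀ (fuel : Nat) (l acc : List Char), l.length ≤ fuel →
    PySem.Chars.replace.go [b] [] fuel l acc = acc.reverse ++ l.filter (fun c => !(c == b)) := by
  intro fuel
  induction fuel with
  | zero =>
    intro l acc hl
    have : l = [] := List.eq_nil_of_length_eq_zero (Nat.le_zero.mp hl)
    subst this
    simp [PySem.Chars.replace.go]
  | succ fuel ih =>
    intro l acc hl
    cases l with
    | nil => simp [PySem.Chars.replace.go]
    | cons c t =>
      rw [PySem.Chars.replace.go]
      by_cases hc : c = b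
      · subst hc
        rw [if_pos (by simp [List.isPrefixOf])]
        rw [ih _ _ (by simpa using Nat.le_of_succ_le_succ hl)]
        simp
      · rw [if_neg (by simp [List.isPrefixOf, Ne.symm hc])]
        rw [ih _ _ (by simpa using Nat.le_of_succ_le_succ hl)]
        simp [hc]

theorem pvReplaceDel (b : Char) (cs : List Char) :
    PySem.Chars.replace cs [b] [] = cs.filter (fun c => !(c == b)) := by
  rw [PySem.Chars.replace]
  rw [if_neg (by simp)]
  rw [pvReplaceGo b _ _ _ le_rfl]
  simp

theorem pvEscNoNl (q c : Char) (hq : q ≠ '\n') : ∀ d ∈ pvEsc q c, d ≠ '\n' := by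
  intro d hd
  unfold pvEsc at hd
  split_ifs at hd with h1 h2 h3 h4 h5
  · rcases List.mem_cons.mp hd with h | h <;> simp_all
  · rcases List.mem_cons.mp hd with h | h
    · subst h; decide
    · simp at h; exact h ▸ hq
  · rcases List.mem_cons.mp hd with h | h <;> simp_all
  · rcases List.mem_cons.mp hd with h | h <;> simp_all
  · rcases List.mem_cons.mp hd with h | h <;> simp_all
  · simp at hd; exact hd ▸ h4

theorem pvJoinMem (sep : List Char) (parts : List (List Char)) :
    ∀ c ∈ PySem.Chars.join sep parts, c ∈ sep ∨ ∃ p ∈ parts, c ∈ p := by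
  induction parts with
  | nil => intro c hc; rw [PySem.Chars.join_nil] at hc; simp at hc
  | cons p ps ih =>
    intro c hc
    cases ps with
    | nil =>
      rw [PySem.Chars.join_singleton] at hc
      exact Or.inr ⟨p, by simp, hc⟩
    | cons p' ps' =>
      rw [PySem.Chars.join_cons_cons] at hc
      rcases List.mem_append.mp hc with h | h
      · rcases List.mem_append.mp h with h | h
        · exact Or.inr ⟨p, by simp, h⟩
        · exact Or.inl h
      · rcases ih c h with h | ⟨pp, hpp, hcc⟩
        · exact Or.inl h
        · exact Or.inr ⟨pp, List.mem_cons_of_mem _ hpp, hcc⟩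

theorem pvReprNoNl (cs : List Char) : ∀ c ∈ pvRepr cs, c ≠ '\n' := by
  intro c hc
  unfold pvRepr at hc
  have hq : (if '\'' ∈ cs ∧ '"' ∉ cs then '"' else '\'') ≠ '\n' := by
    split_ifs <;> decide
  rcases List.mem_cons.mp hc with h | h
  · exact h ▸ hq
  · rcases List.mem_append.mp h with h | h
    · rcases List.mem_flatMap.mp h with ⟨a, _, ha⟩
      exact pvEscNoNl _ a hq c ha
    · simp at h; exact h ▸ hq

theorem pvFmtNoNl (v : List (List Char)) : ∀ c ∈ pvFmt v, c ≠ '\n' := by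
  intro c hc
  unfold pvFmt at hc
  rw [pvReplaceDel, pvReplaceDel, pvReplaceDel] at hc
  have h1 := List.mem_of_mem_filter (List.mem_of_mem_filter (List.mem_of_mem_filter hc))
  unfold pvStrOfList at h1
  rcases List.mem_cons.mp h1 with h | h
  · exact h ▸ (by decide)
  · rcases List.mem_append.mp h with h | h
    · rcases pvJoinMem _ _ c h with h2 | ⟨p, hp, hcp⟩
      · rcases List.mem_cons.mp h2 with h3 | h3
        · exact h3 ▸ (by decide)
        · simp at h3; exact h3 ▸ (by decide)
      · rcases List.mem_map.mp hp with ⟨s, _, rfl⟩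
        exact pvReprNoNl s c hcp
    · simp at h; exact h ▸ (by decide)

theorem pvLinesOk (l : List (List Char × List (List Char))) :
    ∀ s ∈ (pvGroups (pvEntries l)).map pvLine, s ≠ [] ∧ s.head? ≠ some '\n' ∧ s.getLast? ≠ some '\n' := by
  intro s hs
  rcases List.mem_map.mp hs with ⟨p, hp, rfl⟩
  have hp2 : ∃ e ∈ pvEntries l, p.2 = e.2 := by
    unfold pvGroups at hp
    rcases List.mem_flatMap.mp hp with ⟨q, _, hq2⟩
    rcases List.mem_map.mp hq2 with ⟨t, ht, rfl⟩
    rw [PySem.List.mem_sorted] at ht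
    rcases List.mem_map.mp ht with ⟨e, he, rfl⟩
    exact ⟨e, List.mem_of_mem_filter he, rfl⟩
  rcases hp2 with ⟨e, hel, hpe⟩
  rcases List.mem_map.mp hel with ⟨kv, _, hkv⟩
  have hshape : p.2 = kv.1 ++ [':', ' '] ++ pvFmt (PySem.List.sorted kv.2 (fun x => x) false) := by
    rw [hpe, ← hkv]
  refine ⟨?_, ?_, ?_⟩
  · unfold pvLine; cases PySem.Int.toChars p.1 <;> simp
  · unfold pvLine
    cases hT : PySem.Int.toChars p.1 with
    | nil => simp
    | cons c cs =>
      have : c ≠ '\n' := pvToCharsNoNl p.1 c (hT ▸ List.mem_cons_self)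
      simpa using this
  · unfold pvLine
    rw [hshape]
    cases hF : pvFmt (PySem.List.sorted kv.2 (fun x => x) false) with
    | nil =>
      rw [List.append_nil, List.getLast?_append_of_ne_nil _ (by simp),
        List.getLast?_append_of_ne_nil _ (by simp)]
      simp
    | cons c cs =>
      rw [List.getLast?_append_of_ne_nil _ (by simp),
        List.getLast?_append_of_ne_nil _ (by simp)]
      intro hlast
      have hmem : '\n' ∈ pvFmt (PySem.List.sorted kv.2 (fun x => x) false) := by
        rw [hF]; exact List.mem_of_getLast? hlast
      exact pvFmtNoNl _ '\n' hmem rfl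

-- ---------- strip/join assembly ----------
theorem pvFlatMapNl (L : List (List Char)) (hL : L ≠ []) :
    L.flatMap (fun s => s ++ ['\n']) = PySem.Chars.join ['\n'] L ++ ['\n'] := by
  induction L with
  | nil => exact absurd rfl hL
  | cons l L ih =>
    cases L with
    | nil => simp [PySem.Chars.join_singleton]
    | cons l' L' =>
      rw [PySem.Chars.join_cons_cons]
      simp only [List.flatMap_cons] at ih ⊢
      rw [ih (by simp)]
      simp

theorem pvHeadJoin (L : List (List Char)) (h : ∀ s ∈ L, s ≠ [] ∧ s.head? ≠ some '\n') :
    (PySem.Chars.join ['\n'] L).head? ≠ some '\n' := by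
  induction L with
  | nil => simp [PySem.Chars.join_nil]
  | cons l L ih =>
    cases L with
    | nil =>
      rw [PySem.Chars.join_singleton]
      exact (h l (by simp)).2
    | cons l' L' =>
      rw [PySem.Chars.join_cons_cons]
      rcases h l (by simp) with ⟨hne, hh⟩
      cases l with
      | nil => exact absurd rfl hne
      | cons c cs => simpa using hh

theorem pvJoinNe (l : List Char) (L : List (List Char)) (hl : l ≠ []) :
    PySem.Chars.join ['\n'] (l :: L) ≠ [] := by
  cases L with
  | nil => simpa [PySem.Chars.join_singleton] using hl
  | cons l' L' =>
    rw [PySem.Chars.join_cons_cons]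
    simp

theorem pvLastJoin (L : List (List Char)) (h : ∀ s ∈ L, s ≠ [] ∧ s.getLast? ≠ some '\n') :
    (PySem.Chars.join ['\n'] L).getLast? ≠ some '\n' := by
  induction L with
  | nil => simp [PySem.Chars.join_nil]
  | cons l L ih =>
    cases L with
    | nil =>
      rw [PySem.Chars.join_singleton]
      exact (h l (by simp)).2
    | cons l' L' =>
      rw [PySem.Chars.join_cons_cons]
      have hne : PySem.Chars.join ['\n'] (l' :: L') ≠ [] :=
        pvJoinNe l' L' (h l' (by simp)).1
      rw [List.append_assoc, List.getLast?_append_of_ne_nil _ (by simp),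
        List.getLast?_append_of_ne_nil _ hne]
      exact ih (fun s hs => h s (List.mem_cons_of_mem _ hs))

theorem pvStripApp (X : List Char) (hne : X ≠ []) (hh : X.head? ≠ some '\n')
    (hl : X.getLast? ≠ some '\n') : PySem.Chars.stripChars (X ++ ['\n']) ['\n'] = X := by
  show (List.dropWhile (fun c => List.contains ['\n'] c)
      (List.dropWhile (fun c => List.contains ['\n'] c) (X ++ ['\n'])).reverse).reverse = X
  have h1 : List.dropWhile (fun c => List.contains ['\n'] c) (X ++ ['\n']) = X ++ ['\n'] := by
    cases X with
    | nil => exact absurd rfl hne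
    | cons c X' =>
      have hcn : c ≠ '\n' := by intro hc; exact hh (by simp [hc])
      simp [hcn]
  rw [h1, List.reverse_append]
  have h2 : List.dropWhile (fun c => List.contains ['\n'] c) ('\n' :: X.reverse)
      = List.dropWhile (fun c => List.contains ['\n'] c) X.reverse := by
    simp
  have h3 : List.dropWhile (fun c => List.contains ['\n'] c) X.reverse = X.reverse := by
    cases hXr : X.reverse with
    | nil => simp
    | cons c t =>
      have hc : c ≠ '\n' := by
        intro hc
        apply hl
        rw [← List.head?_reverse, hXr, hc]
        rfl
      simp [hc]
  simp only [List.reverse_singleton, List.singleton_append]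
  rw [h2, h3, List.reverse_reverse]

theorem pvStripJoin (L : List (List Char))
    (h : ∀ s ∈ L, s ≠ [] ∧ s.head? ≠ some '\n' ∧ s.getLast? ≠ some '\n') :
    PySem.Chars.stripChars (L.flatMap (fun s => s ++ ['\n'])) ['\n'] = PySem.Chars.join ['\n'] L := by
  cases L with
  | nil => rfl
  | cons l L' =>
    rw [pvFlatMapNl _ (by simp)]
    exact pvStripApp _ (pvJoinNe l L' (h l (by simp)).1)
      (pvHeadJoin _ (fun s hs => ⟨(h s hs).1, (h s hs).2.1⟩))
      (pvLastJoin _ (fun s hs => ⟨(h s hs).1, (h s hs).2.2⟩))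

-- ---------- main ----------
theorem pvMain (l : List (List Char × List (List Char))) : pvCountA l = pvCountB l := by
  rw [pvCountA_eq, pvCountB_eq, pvKey, pvStripJoin _ (pvLinesOk l)]

-- ===== VERDICT (by name: the statement is the Claim_ definition above) =====
theorem count_animals_spec : Claim_equal_count_animals := by
  intro animals _
  unfold Spec_count_animals count_animals count_animals_alt
  rw [pvMain]
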